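-- pv_equiv track=rewrite | github.com/JulesRigaudGithub/from-nand-to-tetris | asmN2T/assemblerN2T.py | fstRead
-- ===== SOURCE A (Python) =====
-- def fstRead(code):
--     val = {"R0":0,"R1":1,"R2":2,"R3":3,"R4":4,"R5":5,"R6":6,"R7":7,"R8":8,"R9":9,"R10":10,"R11":11,"R12":12,"R13":13,"R14":14,"R15":15,"SCREEN":16384,"KBD":24576,"SP":0,"LCL":1,"ARG":2,"THIS":3,"THAT":4}
--     m = 16
--     ncode = []
--     cnt = 0
--     for l in code:
--         if l.startswith('('):
--             k = l.find(")")
--             val[l[1:k]] = cnt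
--         else:
--             cnt += 1
--
--     for l in code:
--         if l.startswith('@'):
--             s = l[1:]
--             if not(s.isnumeric()):
--                 if s in val:
--                     ncode.append("@"+str(val[s]))
--                 else:
--                     ncode.append("@"+str(m))
--                     val[s] = m
--                     m+=1
--             else :
--                 ncode.append(l)
--
--         elif not l.startswith("("):
--             ncode.append(l)
--     return ncode
-- ===== SOURCE B (Python) =====
-- def fstRead(code):
--     val = {"R0":0,"R1":1,"R2":2,"R3":3,"R4":4,"R5":5,"R6":6,"R7":7,"R8":8,"R9":9,"R10":10,"R11":11,"R12":12,"R13":13,"R14":14,"R15":15,"SCREEN":16384,"KBD":24576,"SP":0,"LCL":1,"ARG":2,"THIS":3,"THAT":4}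
--     # Pass 1: keep the non-label lines; a label's address is the number of
--     # instructions kept so far.
--     instrs = []
--     for l in code:
--         if l.startswith('('):
--             val[l[1:l.find(")")]] = len(instrs)
--         else:
--             instrs.append(l)
--     # Precompute the COMPLETE symbol table: the symbolic @-references, in order,
--     # deduplicated and filtered of known names, get addresses 16, 17, ...
--     syms = [l[1:] for l in instrs if l.startswith('@') and not l[1:].isnumeric()]
--     for i, s in enumerate(dict.fromkeys(s for s in syms if s not in val)):
--         val[s] = 16 + i
--     # Emission is a pure, stateless map over the instruction list.
--     return ["@" + str(val[l[1:]]) if l.startswith('@') and not l[1:].isnumeric() else l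
--             for l in instrs]
-- ===== Notes on version B (the rewrite author's own statement) =====
-- stated objective: alternative
-- what changed: Instead of A's stateful resolution loop that allocates variable addresses while emitting, B precomputes the complete symbol table up front (labels while filtering in pass 1, then fresh variables via order-preserving dict.fromkeys dedup + enumerate of the symbolic references), so emission becomes a pure stateless map over the instruction list.
import Mathlib
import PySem

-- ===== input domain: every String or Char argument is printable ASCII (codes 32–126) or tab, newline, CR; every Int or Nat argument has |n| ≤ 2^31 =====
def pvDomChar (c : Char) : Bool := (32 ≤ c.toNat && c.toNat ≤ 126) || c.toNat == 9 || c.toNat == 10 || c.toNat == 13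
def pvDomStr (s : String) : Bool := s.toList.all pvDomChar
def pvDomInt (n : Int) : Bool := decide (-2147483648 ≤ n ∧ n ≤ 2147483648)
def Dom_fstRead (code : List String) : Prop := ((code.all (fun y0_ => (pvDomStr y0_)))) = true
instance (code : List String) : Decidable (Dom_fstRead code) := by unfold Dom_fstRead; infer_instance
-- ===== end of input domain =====

-- B precomputes the COMPLETE symbol table up front (labels in pass 1, then fresh
-- variables by dedup-and-enumerate of the symbolic references) so that emission is a
-- pure stateless map; objective: alternative decomposition, same O(n) cost.
-- ('s.isnumeric()' is ported as PySem.Str.strIsdigit, exact on the ASCII domain.)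

-- ===== PORT A =====
def pvInitVal : PySem.Dict String Int := PySem.Dict.ofList
  [("R0",0),("R1",1),("R2",2),("R3",3),("R4",4),("R5",5),("R6",6),("R7",7),("R8",8),
   ("R9",9),("R10",10),("R11",11),("R12",12),("R13",13),("R14",14),("R15",15),
   ("SCREEN",16384),("KBD",24576),("SP",0),("LCL",1),("ARG",2),("THIS",3),("THAT",4)]

-- first loop of A: record each label's address cnt (= number of non-label lines seen)
def pvPass1A : List String → PySem.Dict String Int → Int → PySem.Dict String Int
  | [], val, _ => val
  | l :: rest, val, cnt =>
    if PySem.Str.startswith l "(" then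
      pvPass1A rest (val.insert (PySem.Str.slice l (some 1) (some (PySem.Str.find l ")"))) cnt) cnt
    else pvPass1A rest val (cnt + 1)

-- second loop of A; 'ncode.append(x)' becomes consing x in front of the recursion on the rest
-- ("@"+str(v) is String.ofList ('@' :: PySem.Int.toChars v), exact concatenation on code points)
def pvPass2A : List String → PySem.Dict String Int → Int → List String
  | [], _, _ => []
  | l :: rest, val, m =>
    if PySem.Str.startswith l "@" then
      let s := PySem.Str.slice l (some 1) none
      if PySem.Str.strIsdigit s = false then
        match val.get? s with
        | some v => String.ofList ('@' :: PySem.Int.toChars v) :: pvPass2A rest val m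
        | none => String.ofList ('@' :: PySem.Int.toChars m) :: pvPass2A rest (val.insert s m) (m + 1)
      else l :: pvPass2A rest val m
    else if PySem.Str.startswith l "(" then pvPass2A rest val m
    else l :: pvPass2A rest val m

def fstRead (code : List String) : List String :=
  pvPass2A code (pvPass1A code pvInitVal 0) 16

-- ===== PORT B =====
-- pass 1 of B: build the instruction list and the label table together
def pvPass1B : List String → PySem.Dict String Int → List String →
    PySem.Dict String Int × List String
  | [], val, instrs => (val, instrs)
  | l :: rest, val, instrs =>
    if PySem.Str.startswith l "(" then
      pvPass1B rest
        (val.insert (PySem.Str.slice l (some 1) (some (PySem.Str.find l ")")))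
          (instrs.length : Int)) instrs
    else pvPass1B rest val (instrs ++ [l])

-- Source B's repeated condition "l.startswith('@') and not l[1:].isnumeric()"
def pvIsSym (l : String) : Bool :=
  PySem.Str.startswith l "@" && !(PySem.Str.strIsdigit (PySem.Str.slice l (some 1) none))

-- B: complete the table (dict.fromkeys = PySem.List.dedup, enumerate, insert), then a
-- pure map emits; 'val[l[1:]]' is total here (every such key was just inserted or is
-- predefined), ported as getD _ 0.
def fstRead_alt (code : List String) : List String :=
  let p := pvPass1B code pvInitVal []
  let syms := (p.2.filter pvIsSym).map (fun l => PySem.Str.slice l (some 1) none)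
  let val := (PySem.List.enumerate (PySem.List.dedup (syms.filter (fun s => !(p.1.contains s)))) 0).foldl
      (fun d q => d.insert q.2 (16 + q.1)) p.1
  p.2.map (fun l => if pvIsSym l then
      String.ofList ('@' :: PySem.Int.toChars (val.getD (PySem.Str.slice l (some 1) none) 0))
    else l)

-- ===== PRECONDITION & SPEC =====
def Spec_fstRead (code : List String) (out : List String) : Prop := out = fstRead_alt code
instance (code : List String) (out : List String) : Decidable (Spec_fstRead code out) := by unfold Spec_fstRead; infer_instance

-- ===== CLAIM (what is proved, stated in full; the proofs are below) =====
def Claim_equal_fstRead : Prop := ∀ (code : List String), Dom_fstRead code → Spec_fstRead code (fstRead code)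

-- ===== LEMMAS AND PROOFS =====

-- a line starting with '(' does not start with '@'
theorem pv_paren_not_at (l : String) (h : PySem.Chars.startswith l.toList ['('] = true) :
    PySem.Chars.startswith l.toList ['@'] = false := by
  rw [PySem.Chars.startswith_iff] at h
  rcases h with ⟨u, hu⟩
  rw [Bool.eq_false_iff]
  intro hc
  rw [PySem.Chars.startswith_iff] at hc
  rcases hc with ⟨v, hv⟩
  have := hu.trans hv.symm
  simp at this

-- B's pass 1 = A's pass 1 + the label-filtered lines
theorem pv_pass1 (code : List String) (val : PySem.Dict String Int) (instrs : List String) :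
    pvPass1B code val instrs =
      (pvPass1A code val (instrs.length : Int),
       instrs ++ code.filter (fun l => !PySem.Str.startswith l "(")) := by
  induction code generalizing val instrs with
  | nil => simp [pvPass1A, pvPass1B]
  | cons l rest ih =>
    by_cases h : PySem.Chars.startswith l.toList ['('] = true
    · simp [pvPass1A, pvPass1B, h, ih]
    · rw [Bool.not_eq_true] at h
      simp [pvPass1A, pvPass1B, h, ih]

-- A's pass 2 never looks at the label lines
theorem pv_pass2_filter (code : List String) (val : PySem.Dict String Int) (m : Int) :
    pvPass2A code val m =
      pvPass2A (code.filter (fun l => !PySem.Str.startswith l "(")) val m := by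
  induction code generalizing val m with
  | nil => rfl
  | cons l rest ih =>
    by_cases hp : PySem.Chars.startswith l.toList ['('] = true
    · have ha := pv_paren_not_at l hp
      simp [pvPass2A, hp, ha, ih]
    · rw [Bool.not_eq_true] at hp
      by_cases hat : PySem.Chars.startswith l.toList ['@'] = true
      · by_cases hd : PySem.Chars.strIsdigit (PySem.List.slice l.toList (some 1) none) = true
        · simp [pvPass2A, hat, hp, hd, ih]
        · rw [Bool.not_eq_true] at hd
          cases hval : val.get? (PySem.Str.slice l (some 1) none) with
          | some a => simp [pvPass2A, hat, hp, hd, hval, ih]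
          | none => simp [pvPass2A, hat, hp, hd, hval, ih]
      · rw [Bool.not_eq_true] at hat
        simp [pvPass2A, hat, hp, ih]

-- proof-side model of the allocation A's pass 2 performs, detached from emission
def pvAlloc : List String → PySem.Dict String Int → Int → PySem.Dict String Int
  | [], val, _ => val
  | l :: rest, val, m =>
    if pvIsSym l then
      if val.contains (PySem.Str.slice l (some 1) none) then pvAlloc rest val m
      else pvAlloc rest (val.insert (PySem.Str.slice l (some 1) none) m) (m + 1)
    else pvAlloc rest val m

-- allocation never overwrites: existing bindings survive
theorem pvAlloc_mono (instrs : List String) (val : PySem.Dict String Int) (m : Int)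
    {s : String} {a : Int} (h : val.get? s = some a) :
    (pvAlloc instrs val m).get? s = some a := by
  induction instrs generalizing val m with
  | nil => simpa [pvAlloc] using h
  | cons l rest ih =>
    by_cases hs : pvIsSym l = true
    · by_cases hc : val.contains (PySem.Str.slice l (some 1) none) = true
      · simpa [pvAlloc, hs, hc] using ih val m h
      · rw [Bool.not_eq_true] at hc
        have hne : s ≠ PySem.Str.slice l (some 1) none := by
          intro he
          rw [← he] at hc
          rw [PySem.Dict.contains_eq_isSome_get?, h] at hc
          simp at hc
        simp only [pvAlloc, hs, hc, if_true, if_false, Bool.false_eq_true]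
        exact ih _ _ (by rw [PySem.Dict.get?_insert, if_neg hne]; exact h)
    · rw [Bool.not_eq_true] at hs
      simpa [pvAlloc, hs] using ih val m h

-- A's pass 2, on a label-free list, is a pure map under the final allocation table
theorem pv_emit (instrs : List String) (val : PySem.Dict String Int) (m : Int)
    (h : ∀ l ∈ instrs, PySem.Str.startswith l "(" = false) :
    pvPass2A instrs val m =
      instrs.map (fun l => if pvIsSym l then
          String.ofList ('@' :: PySem.Int.toChars
            ((pvAlloc instrs val m).getD (PySem.Str.slice l (some 1) none) 0))
        else l) := by
  induction instrs generalizing val m with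
  | nil => rfl
  | cons l rest ih =>
    have hp : PySem.Chars.startswith l.toList ['('] = false := h l (by simp)
    have hrest : ∀ x ∈ rest, PySem.Str.startswith x "(" = false :=
      fun x hx => h x (by simp [hx])
    by_cases hat : PySem.Chars.startswith l.toList ['@'] = true
    · by_cases hd : PySem.Chars.strIsdigit (PySem.List.slice l.toList (some 1) none) = true
      · have hs : pvIsSym l = false := by simp [pvIsSym, PySem.Str.strIsdigit, hd]
        simp [pvPass2A, pvAlloc, hat, hd, hs, ih _ _ hrest]
      · rw [Bool.not_eq_true] at hd
        have hs : pvIsSym l = true := by simp [pvIsSym, PySem.Str.startswith, PySem.Str.strIsdigit, hat, hd]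
        cases hval : val.get? (PySem.Str.slice l (some 1) none) with
        | some a =>
          have hc : val.contains (PySem.Str.slice l (some 1) none) = true := by
            rw [PySem.Dict.contains_eq_isSome_get?, hval]; rfl
          have hget := pvAlloc_mono rest val m hval
          simp [pvPass2A, pvAlloc, hat, hd, hs, hc, hval, ih _ _ hrest,
            PySem.Dict.getD_of_get?_eq_some _ _ hget]
        | none =>
          have hc : val.contains (PySem.Str.slice l (some 1) none) = false := by
            rw [PySem.Dict.contains_eq_isSome_get?, hval]; rfl
          have hget := pvAlloc_mono rest (val.insert (PySem.Str.slice l (some 1) none) m) (m + 1)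
            (PySem.Dict.get?_insert_self _ _ _)
          simp [pvPass2A, pvAlloc, hat, hd, hs, hc, hval, ih _ _ hrest,
            PySem.Dict.getD_of_get?_eq_some _ _ hget]
    · rw [Bool.not_eq_true] at hat
      have hs : pvIsSym l = false := by simp [pvIsSym, PySem.Str.startswith, hat]
      simp [pvPass2A, pvAlloc, hat, hp, hs, ih _ _ hrest]

-- sequential insertion at m, m+1, … (proof-side reading of B's enumerate-fold)
def pvInsertSeq : PySem.Dict String Int → Int → List String → PySem.Dict String Int
  | val, _, [] => val
  | val, m, s :: L => pvInsertSeq (val.insert s m) (m + 1) L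

theorem pv_enumFold (L : List String) (k : Int) (val : PySem.Dict String Int) (m : Int) :
    (PySem.List.enumerate L k).foldl (fun d q => d.insert q.2 (m + q.1)) val =
      pvInsertSeq val (m + k) L := by
  induction L generalizing k val with
  | nil => rfl
  | cons s L ih =>
    rw [PySem.List.enumerate_cons]
    simp only [List.foldl_cons, pvInsertSeq]
    rw [ih]
    ring_nf

-- discard commutes with ofList as a filter
theorem pv_discard_discard {α : Type} [BEq α] (A : List α) (a b : α) :
    PySem.Set.discard (PySem.Set.discard A a) b = PySem.Set.discard (PySem.Set.discard A b) a := by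
  simp [PySem.Set.discard, List.filter_filter, Bool.and_comm]

theorem pv_discard_ofList (X : List String) (s : String) :
    PySem.Set.discard (PySem.Set.ofList X) s = PySem.Set.ofList (X.filter (fun t => !(t == s))) := by
  induction X with
  | nil => rfl
  | cons x X ih =>
    by_cases he : x = s
    · subst he
      have : PySem.Set.discard (x :: PySem.Set.discard (PySem.Set.ofList X) x) x =
          PySem.Set.discard (PySem.Set.ofList X) x := by
        simp [PySem.Set.discard, List.filter_filter]
      rw [PySem.Set.ofList_cons, this, ih]
      simp
    · have hx : (x == s) = false := by simp [he]
      rw [PySem.Set.ofList_cons]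
      have h1 : PySem.Set.discard (x :: PySem.Set.discard (PySem.Set.ofList X) x) s
           = x :: PySem.Set.discard (PySem.Set.discard (PySem.Set.ofList X) x) s := by
        simp [PySem.Set.discard, hx]
      rw [h1, pv_discard_discard, ih]
      have h2 : List.filter (fun t => !(t == s)) (x :: X)
           = x :: List.filter (fun t => !(t == s)) X := by
        simp [hx]
      rw [h2, PySem.Set.ofList_cons]

-- A's interleaved allocation = B's dedup-then-enumerate table
theorem pv_alloc_fresh (instrs : List String) (val : PySem.Dict String Int) (m : Int) :
    pvAlloc instrs val m =
      pvInsertSeq val m (PySem.List.dedup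
        ((((instrs.filter pvIsSym).map (fun l => PySem.Str.slice l (some 1) none))).filter
          (fun s => !(val.contains s)))) := by
  induction instrs generalizing val m with
  | nil => rfl
  | cons l rest ih =>
    by_cases hs : pvIsSym l = true
    · by_cases hc : val.contains (PySem.Str.slice l (some 1) none) = true
      · simp [pvAlloc, hs, hc, ih]
      · rw [Bool.not_eq_true] at hc
        simp only [pvAlloc, hs, hc, if_true, if_false, Bool.false_eq_true]
        rw [ih]
        simp only [List.filter_cons, hs, if_true, List.map_cons, hc, Bool.not_false,
          PySem.List.dedup_eq_ofList, PySem.Set.ofList_cons]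
        rw [pv_discard_ofList]
        simp only [pvInsertSeq, List.filter_filter]
        congr 1
        congr 1
        apply List.filter_congr
        intro t _
        rw [PySem.Dict.contains_insert]
        cases h1 : (t == PySem.Str.slice l (some 1) none) <;> cases h2 : val.contains t <;> simp
    · rw [Bool.not_eq_true] at hs
      simp [pvAlloc, hs, ih]

-- ===== VERDICT (by name: the statement is the Claim_ definition above) =====
theorem fstRead_spec : Claim_equal_fstRead := by
  intro code _
  unfold Spec_fstRead fstRead fstRead_alt
  rw [pv_pass1]
  have hnp : ∀ l ∈ code.filter (fun l => !PySem.Str.startswith l "("),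
      PySem.Str.startswith l "(" = false := by
    intro l hl
    simpa using (List.of_mem_filter hl)
  rw [pv_pass2_filter, pv_emit _ _ _ hnp]
  simp only [List.nil_append]
  rw [show ((0 : Int)) = (([] : List String).length : Int) from rfl] at *
  rw [pv_enumFold, pv_alloc_fresh]
  norm_num
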